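-- pv_equiv track=rewrite | github.com/dosido-git/deftbrain | backend/routes/wrap_json_parse.py | _skip_string_or_comment
-- ===== SOURCE A (Python) =====
-- def _skip_string_or_comment(s, pos):
--     """If s[pos] starts a string literal or comment, return the position just
--     past it. Otherwise return pos unchanged. Handles:
--       - // line comments
--       - /* block comments */
--       - 'single' and "double" quoted strings with backslash escapes
--       - `backtick` template literals INCLUDING ${...} interpolation
--         (recursively skips nested strings/comments inside the ${} expression
--         and tracks brace depth so nested objects don't false-close)
--
--     This recursive design fixes the v1.0 bug where a backtick string
--     containing nested templates like ${flag ? `inner` : 'fallback'} was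
--     incorrectly closed at the inner backtick, after which the scanner ran
--     into phantom-string territory and silently skipped any JSON.parse calls
--     in the rest of the file.
--     """
--     if pos >= len(s):
--         return pos
--     ch = s[pos]
--
--     # Line comment
--     if ch == '/' and pos + 1 < len(s) and s[pos + 1] == '/':
--         end = s.find('\n', pos)
--         return end if end != -1 else len(s)
--
--     # Block comment
--     if ch == '/' and pos + 1 < len(s) and s[pos + 1] == '*':
--         end = s.find('*/', pos + 2)
--         return (end + 2) if end != -1 else len(s)
--
--     # Single/double quoted strings — no interpolation
--     if ch in ('"', "'"):
--         quote = ch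
--         i = pos + 1
--         while i < len(s):
--             c = s[i]
--             if c == '\\' and i + 1 < len(s):
--                 i += 2
--                 continue
--             if c == quote:
--                 return i + 1
--             i += 1
--         return len(s)
--
--     # Backtick template literal — handle ${...} interpolation
--     if ch == '`':
--         i = pos + 1
--         while i < len(s):
--             c = s[i]
--             if c == '\\' and i + 1 < len(s):
--                 i += 2
--                 continue
--             if c == '`':
--                 return i + 1
--             if c == '$' and i + 1 < len(s) and s[i + 1] == '{':
--                 # Enter ${...} expression. Walk it as code, tracking brace
--                 # depth and recursively skipping nested strings/comments.
--                 depth = 1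
--                 j = i + 2
--                 while j < len(s) and depth > 0:
--                     nj = _skip_string_or_comment(s, j)
--                     if nj != j:
--                         j = nj
--                         continue
--                     cj = s[j]
--                     if cj == '{':
--                         depth += 1
--                     elif cj == '}':
--                         depth -= 1
--                         if depth == 0:
--                             j += 1
--                             break
--                     j += 1
--                 i = j
--                 continue
--             i += 1
--         return len(s)
--
--     return pos
-- ===== SOURCE B (Python) =====
-- def _scan_quote(s, i, quote):
--     n = len(s)
--     while i < n:
--         c = s[i]
--         if c == '\\' and i + 1 < n:
--             i += 2
--         elif c == quote:
--             return i + 1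
--         else:
--             i += 1
--     return n
--
--
-- def _skip_string_or_comment(s, pos):
--     """Iterative re-implementation: the backtick/${...} recursion of the
--     original is replaced by one loop over an explicit stack of frames
--     (-1 = inside a template literal, k >= 1 = inside a ${...} expression
--     at brace depth k)."""
--     n = len(s)
--     if pos >= n:
--         return pos
--     ch = s[pos]
--     if ch == '/' and pos + 1 < n and s[pos + 1] == '/':
--         nl = s.find('\n', pos)
--         return nl if nl != -1 else n
--     if ch == '/' and pos + 1 < n and s[pos + 1] == '*':
--         e = s.find('*/', pos + 2)
--         return e + 2 if e != -1 else n
--     if ch == '"' or ch == "'":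
--         return _scan_quote(s, pos + 1, ch)
--     if ch != '`':
--         return pos
--     stack = [-1]
--     i = pos + 1
--     while stack:
--         if i >= n:
--             return n
--         c = s[i]
--         if stack[-1] == -1:
--             # inside a template literal
--             if c == '\\' and i + 1 < n:
--                 i += 2
--             elif c == '`':
--                 stack.pop()
--                 i += 1
--             elif c == '$' and i + 1 < n and s[i + 1] == '{':
--                 stack.append(1)
--                 i += 2
--             else:
--                 i += 1
--         else:
--             # inside a ${...} expression, stack[-1] = brace depth
--             if c == '/' and i + 1 < n and s[i + 1] == '/':
--                 nl = s.find('\n', i)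
--                 i = nl if nl != -1 else n
--             elif c == '/' and i + 1 < n and s[i + 1] == '*':
--                 e = s.find('*/', i + 2)
--                 i = e + 2 if e != -1 else n
--             elif c == '"' or c == "'":
--                 i = _scan_quote(s, i + 1, c)
--             elif c == '`':
--                 stack.append(-1)
--                 i += 1
--             elif c == '{':
--                 stack[-1] += 1
--                 i += 1
--             elif c == '}':
--                 stack[-1] -= 1
--                 if stack[-1] == 0:
--                     stack.pop()
--                 i += 1
--             else:
--                 i += 1
--     return i
-- ===== Notes on version B (the rewrite author's own statement) =====
-- stated objective: alternative
-- what changed: A skips a backtick template literal by recursing into each ${...} interpolation (a recursive descent with an inner brace-depth loop); B replaces the recursion by a single iterative loop over an explicit stack of frames (-1 = template literal, k>=1 = ${...} expression at brace depth k), keeping the direct fast paths for comments and plain quoted strings.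
import Mathlib
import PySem

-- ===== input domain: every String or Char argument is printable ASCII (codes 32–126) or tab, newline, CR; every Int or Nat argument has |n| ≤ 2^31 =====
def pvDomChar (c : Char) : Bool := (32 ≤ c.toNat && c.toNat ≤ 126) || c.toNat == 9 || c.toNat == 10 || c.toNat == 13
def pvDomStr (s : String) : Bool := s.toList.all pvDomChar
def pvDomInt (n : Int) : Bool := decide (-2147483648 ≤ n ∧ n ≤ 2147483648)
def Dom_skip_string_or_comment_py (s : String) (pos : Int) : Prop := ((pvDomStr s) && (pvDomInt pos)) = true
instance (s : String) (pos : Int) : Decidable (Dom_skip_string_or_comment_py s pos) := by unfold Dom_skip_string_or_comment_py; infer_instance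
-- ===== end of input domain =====

-- B re-implements the recursive template-literal scanner of A as one iterative loop over an
-- explicit stack of frames; equal return values on every input where A returns (Pre_ below).

-- s[i] for an index already checked in range (Python raises out of range; such inputs are outside Pre_)
def pvRd (cs : List Char) (i : Int) : Char := (PySem.List.pyGet? cs i).getD ' '

-- ===== PORT A =====
-- the `while i < len(s)` loop of A's quoted-string branch (identical helper loop in B's Source B);
-- fuel is only a totality guard, one unit per iteration, never exhausted on ports' calls
def scanQuoteF (cs : List Char) (i : Int) (q : Char) : Nat → Int
  | 0 => 0
  | f + 1 =>
    if i < (cs.length : Int) then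
      if pvRd cs i = '\\' ∧ i + 1 < (cs.length : Int) then scanQuoteF cs (i + 2) q f
      else if pvRd cs i = q then i + 1
      else scanQuoteF cs (i + 1) q f
    else (cs.length : Int)

def scanQuote (cs : List Char) (i : Int) (q : Char) : Int :=
  scanQuoteF cs i q (((cs.length : Int) - i).toNat + 1)

mutual
-- _skip_string_or_comment, its backtick `while` loop (tmplAF) and the ${...} `while` loop (exprAF);
-- fuel decreases once per loop iteration / nested call, a totality guard only
def skipAF (cs : List Char) (pos : Int) : Nat → Int
  | 0 => 0
  | _f + 1 =>
    if (cs.length : Int) ≤ pos then pos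
    else
      if pvRd cs pos = '/' ∧ pos + 1 < (cs.length : Int) ∧ pvRd cs (pos + 1) = '/' then
        (if PySem.Chars.findFrom cs ['\n'] pos = -1 then (cs.length : Int)
         else PySem.Chars.findFrom cs ['\n'] pos)
      else if pvRd cs pos = '/' ∧ pos + 1 < (cs.length : Int) ∧ pvRd cs (pos + 1) = '*' then
        (if PySem.Chars.findFrom cs ['*', '/'] (pos + 2) = -1 then (cs.length : Int)
         else PySem.Chars.findFrom cs ['*', '/'] (pos + 2) + 2)
      else if pvRd cs pos = '"' ∨ pvRd cs pos = '\'' then scanQuote cs (pos + 1) (pvRd cs pos)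
      else if pvRd cs pos = '`' then tmplAF cs (pos + 1) _f
      else pos

def tmplAF (cs : List Char) (i : Int) : Nat → Int
  | 0 => 0
  | _f + 1 =>
    if (cs.length : Int) ≤ i then (cs.length : Int)
    else if pvRd cs i = '\\' ∧ i + 1 < (cs.length : Int) then tmplAF cs (i + 2) _f
    else if pvRd cs i = '`' then i + 1
    else if pvRd cs i = '$' ∧ i + 1 < (cs.length : Int) ∧ pvRd cs (i + 1) = '{' then
      tmplAF cs (exprAF cs (i + 2) 1 _f) _f
    else tmplAF cs (i + 1) _f

def exprAF (cs : List Char) (j d : Int) : Nat → Int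
  | 0 => 0
  | _f + 1 =>
    if ¬ (j < (cs.length : Int) ∧ 0 < d) then j
    else
      if skipAF cs j _f ≠ j then exprAF cs (skipAF cs j _f) d _f
      else if pvRd cs j = '{' then exprAF cs (j + 1) (d + 1) _f
      else if pvRd cs j = '}' then (if d = 1 then j + 1 else exprAF cs (j + 1) (d - 1) _f)
      else exprAF cs (j + 1) d _f
end

def skip_string_or_comment_py (s : String) (pos : Int) : Int :=
  skipAF s.toList pos (2 * (((s.toList.length : Int) - pos).toNat) + 8)

-- ===== PORT B =====
-- Source B's single `while stack:` loop; the stack is Source B's list of ints (-1 = template frame,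
-- t ≥ 1 = ${...} frame at brace depth t); fuel = one unit per iteration, totality guard only
def runBF (cs : List Char) (stack : List Int) (i : Int) : Nat → Int
  | 0 => 0
  | _f + 1 =>
    match stack with
    | [] => i
    | t :: rest =>
      if (cs.length : Int) ≤ i then (cs.length : Int)
      else if t = -1 then
        if pvRd cs i = '\\' ∧ i + 1 < (cs.length : Int) then runBF cs (t :: rest) (i + 2) _f
        else if pvRd cs i = '`' then runBF cs rest (i + 1) _f
        else if pvRd cs i = '$' ∧ i + 1 < (cs.length : Int) ∧ pvRd cs (i + 1) = '{' then
          runBF cs (1 :: t :: rest) (i + 2) _f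
        else runBF cs (t :: rest) (i + 1) _f
      else
        if pvRd cs i = '/' ∧ i + 1 < (cs.length : Int) ∧ pvRd cs (i + 1) = '/' then
          runBF cs (t :: rest)
            (if PySem.Chars.findFrom cs ['\n'] i = -1 then (cs.length : Int)
             else PySem.Chars.findFrom cs ['\n'] i) _f
        else if pvRd cs i = '/' ∧ i + 1 < (cs.length : Int) ∧ pvRd cs (i + 1) = '*' then
          runBF cs (t :: rest)
            (if PySem.Chars.findFrom cs ['*', '/'] (i + 2) = -1 then (cs.length : Int)
             else PySem.Chars.findFrom cs ['*', '/'] (i + 2) + 2) _f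
        else if pvRd cs i = '"' ∨ pvRd cs i = '\'' then
          runBF cs (t :: rest) (scanQuote cs (i + 1) (pvRd cs i)) _f
        else if pvRd cs i = '`' then runBF cs (-1 :: t :: rest) (i + 1) _f
        else if pvRd cs i = '{' then runBF cs ((t + 1) :: rest) (i + 1) _f
        else if pvRd cs i = '}' then
          (if t - 1 = 0 then runBF cs rest (i + 1) _f else runBF cs ((t - 1) :: rest) (i + 1) _f)
        else runBF cs (t :: rest) (i + 1) _f

def skip_string_or_comment_py_alt (s : String) (pos : Int) : Int :=
  let cs := s.toList
  if (cs.length : Int) ≤ pos then pos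
  else
    if pvRd cs pos = '/' ∧ pos + 1 < (cs.length : Int) ∧ pvRd cs (pos + 1) = '/' then
      (if PySem.Chars.findFrom cs ['\n'] pos = -1 then (cs.length : Int)
       else PySem.Chars.findFrom cs ['\n'] pos)
    else if pvRd cs pos = '/' ∧ pos + 1 < (cs.length : Int) ∧ pvRd cs (pos + 1) = '*' then
      (if PySem.Chars.findFrom cs ['*', '/'] (pos + 2) = -1 then (cs.length : Int)
       else PySem.Chars.findFrom cs ['*', '/'] (pos + 2) + 2)
    else if pvRd cs pos = '"' ∨ pvRd cs pos = '\'' then scanQuote cs (pos + 1) (pvRd cs pos)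
    else if pvRd cs pos = '`' then runBF cs [-1] (pos + 1) ((((cs.length : Int) - pos).toNat) + 2)
    else pos

-- ===== PRECONDITION & SPEC =====
-- Pre_ excludes exactly the inputs where A raises IndexError: pos < -len(s) (s[pos] out of range).
def Pre_skip_string_or_comment_py (s : String) (pos : Int) : Prop :=
  -(s.toList.length : Int) ≤ pos
instance (s : String) (pos : Int) : Decidable (Pre_skip_string_or_comment_py s pos) := by
  unfold Pre_skip_string_or_comment_py; infer_instance

def pvWitness_skip_string_or_comment_py : String × Int := ("`a${ {x:'}'} }b`c", 0)

def Spec_skip_string_or_comment_py (s : String) (pos : Int) (out : Int) : Prop :=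
  out = skip_string_or_comment_py_alt s pos
instance (s : String) (pos : Int) (out : Int) : Decidable (Spec_skip_string_or_comment_py s pos out) := by
  unfold Spec_skip_string_or_comment_py; infer_instance

-- ===== CLAIM (what is proved, stated in full; the proofs are below) =====
def Claim_equal_skip_string_or_comment_py : Prop := ∀ (s : String) (pos : Int), Dom_skip_string_or_comment_py s pos → Pre_skip_string_or_comment_py s pos → Spec_skip_string_or_comment_py s pos (skip_string_or_comment_py s pos)

-- ===== LEMMAS AND PROOFS =====

-- fuel bounds (proof-side only): chain-depth that suffices for skipAF / tmplAF / exprAF from x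
def pvFS (cs : List Char) (x : Int) : Nat := 2 * (((cs.length : Int) - x).toNat) + 2
def pvFT (cs : List Char) (x : Int) : Nat := 2 * (((cs.length : Int) - x).toNat) + 1
def pvFE (cs : List Char) (x : Int) : Nat := 2 * (((cs.length : Int) - x).toNat) + 3

-- canonical (fuel-saturated) forms of the four loops
def pvSkipA (cs : List Char) (x : Int) : Int := skipAF cs x (pvFS cs x + 1)
def pvTmplA (cs : List Char) (x : Int) : Int := tmplAF cs x (pvFT cs x + 1)
def pvExprA (cs : List Char) (x d : Int) : Int := exprAF cs x d (pvFE cs x + 1)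
def pvRunB (cs : List Char) (st : List Int) (i : Int) : Int :=
  runBF cs st i ((((cs.length : Int) - i).toNat) + 1)

lemma pvRd_eq (cs : List Char) (i : Int) (h0 : 0 ≤ i) (h1 : i < (cs.length : Int)) :
    pvRd cs i = cs[i.toNat]'(by omega) := by
  simp [pvRd, PySem.List.pyGet?, PySem.List.pyIdx?, h0, h1]

lemma pv_findFrom_facts (cs sub : List Char) (st : Int) (h : PySem.Chars.findFrom cs sub st ≠ -1) :
    0 ≤ PySem.Chars.findFrom cs sub st ∧
    (0 ≤ st → st ≤ PySem.Chars.findFrom cs sub st) ∧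
    PySem.Chars.findFrom cs sub st + sub.length ≤ (cs.length : Int) := by
  simp only [PySem.Chars.findFrom] at h ⊢
  set st' : Int := if st < 0 then if st + ↑cs.length < 0 then 0 else st + ↑cs.length else st with hst'
  have hst'0 : 0 ≤ st' := by simp only [hst']; split_ifs <;> omega
  have hstle : 0 ≤ st → st' = st := by intro h0; simp only [hst']; split_ifs <;> omega
  clear_value st'
  by_cases hlt : (cs.length : Int) < st'
  · simp only [if_pos hlt] at h; omega
  · simp only [if_neg hlt] at h ⊢
    set l := List.drop st'.toNat (List.take (↑cs.length : Int).toNat cs) with hl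
    set r := PySem.Chars.find l sub with hr
    clear_value l r
    by_cases hr1 : r = -1
    · simp only [if_pos hr1] at h; omega
    · simp only [if_neg hr1]
      rw [if_neg hr1] at h
      have hr0 : 0 ≤ r := by have := PySem.Chars.neg_one_le_find l sub; omega
      have hr0' : 0 ≤ PySem.Chars.find l sub := hr ▸ hr0
      have hpre := (PySem.Chars.find_spec (s := l) (sub := sub) hr0').1
      rw [← hr] at hpre
      have hlen : sub.length ≤ l.length - r.toNat := by
        have h2 := hpre.length_le
        rw [List.length_drop] at h2
        omega
      have hrle : r ≤ (l.length : Int) := by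
        have := PySem.Chars.find_le_length l sub; omega
      have hllen : (l.length : Int) = (cs.length : Int) - st' := by
        have hx : l.length = (List.take (↑cs.length : Int).toNat cs).length - st'.toNat := by
          rw [hl, List.length_drop]
        rw [hx, List.length_take]
        omega
      constructor
      · omega
      constructor
      · intro h0; omega
      · omega

lemma pv_findFrom_ne_self (cs sub : List Char) (st : Int) (h0 : 0 ≤ st)
    (h1 : st < (cs.length : Int)) (hch : ¬ sub <+: cs.drop st.toNat) :
    PySem.Chars.findFrom cs sub st ≠ st := by
  intro he
  have hc : ((st.toNat : Nat) : Int) = st := by omega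
  have hk : st.toNat ≤ cs.length := by omega
  have hne : PySem.Chars.findFrom cs sub (st.toNat : Nat) ≠ -1 := by rw [hc, he]; omega
  have := (PySem.Chars.findFrom_natCast_spec cs sub st.toNat hk hne).2.1
  rw [hc, he] at this
  exact hch this

lemma pv_not_prefix (cs : List Char) (i : Int) (h0 : 0 ≤ i) (h1 : i < (cs.length : Int))
    (c : Char) (tl : List Char) (hne : pvRd cs i ≠ c) : ¬ (c :: tl) <+: cs.drop i.toNat := by
  intro hp
  have hh : (cs.drop i.toNat).head? = some c := by
    rcases hp with ⟨t, ht⟩; rw [← ht]; rfl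
  rw [List.head?_drop] at hh
  have : i.toNat < cs.length := by omega
  rw [List.getElem?_eq_getElem this] at hh
  exact hne (by rw [pvRd_eq cs i h0 h1]; exact Option.some_inj.mp hh)

-- the position just past a line comment: > i and ≤ len
lemma pv_nl_adv (cs : List Char) (i : Int) (hlt : i < (cs.length : Int)) (hch : pvRd cs i = '/') :
    i + 1 ≤ (if PySem.Chars.findFrom cs ['\n'] i = -1 then (cs.length : Int)
              else PySem.Chars.findFrom cs ['\n'] i) ∧
    (if PySem.Chars.findFrom cs ['\n'] i = -1 then (cs.length : Int)
     else PySem.Chars.findFrom cs ['\n'] i) ≤ (cs.length : Int) := by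
  by_cases he : PySem.Chars.findFrom cs ['\n'] i = -1
  · rw [if_pos he]; omega
  · rw [if_neg he]
    obtain ⟨hnn, hge, hle⟩ := pv_findFrom_facts cs ['\n'] i he
    simp only [List.length_cons, List.length_nil] at hle
    by_cases h0 : 0 ≤ i
    · have hne := pv_findFrom_ne_self cs ['\n'] i h0 hlt
        (pv_not_prefix cs i h0 hlt '\n' [] (by rw [hch]; decide))
      constructor
      · have := hge h0; omega
      · omega
    · constructor
      · omega
      · omega

-- the position just past a block comment: > i and ≤ len
lemma pv_blk_adv (cs : List Char) (i : Int) (hlt : i < (cs.length : Int)) :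
    i + 1 ≤ (if PySem.Chars.findFrom cs ['*', '/'] (i + 2) = -1 then (cs.length : Int)
              else PySem.Chars.findFrom cs ['*', '/'] (i + 2) + 2) ∧
    (if PySem.Chars.findFrom cs ['*', '/'] (i + 2) = -1 then (cs.length : Int)
     else PySem.Chars.findFrom cs ['*', '/'] (i + 2) + 2) ≤ (cs.length : Int) := by
  by_cases he : PySem.Chars.findFrom cs ['*', '/'] (i + 2) = -1
  · rw [if_pos he]; omega
  · rw [if_neg he]
    obtain ⟨hnn, hge, hle⟩ := pv_findFrom_facts cs ['*', '/'] (i + 2) he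
    simp only [List.length_cons, List.length_nil] at hle
    by_cases h0 : 0 ≤ i + 2
    · have := hge h0; constructor <;> omega
    · constructor <;> omega

lemma pv_scanQF_stab (cs : List Char) (q : Char) :
    ∀ f g i, (((cs.length : Int) - i).toNat) < f → (((cs.length : Int) - i).toNat) < g →
      scanQuoteF cs i q f = scanQuoteF cs i q g := by
  intro f
  induction f with
  | zero => intro g i hf hg; omega
  | succ f ih =>
    intro g i hf hg
    obtain ⟨g', rfl⟩ : ∃ g', g = g' + 1 := ⟨g - 1, by omega⟩
    simp only [scanQuoteF]
    by_cases hlt : i < (cs.length : Int)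
    · simp only [if_pos hlt]
      split_ifs with h1 h2
      · exact ih g' (i + 2) (by omega) (by omega)
      · rfl
      · exact ih g' (i + 1) (by omega) (by omega)
    · simp only [if_neg hlt]

lemma pv_scanQ_bounds (cs : List Char) (q : Char) (i : Int) :
    (i ≤ (cs.length : Int) → i ≤ scanQuote cs i q) ∧ scanQuote cs i q ≤ (cs.length : Int) := by
  suffices h : ∀ f i, (((cs.length : Int) - i).toNat) < f →
      (i ≤ (cs.length : Int) → i ≤ scanQuoteF cs i q f) ∧ scanQuoteF cs i q f ≤ (cs.length : Int) by
    exact h _ i (by omega)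
  intro f
  induction f with
  | zero => intro i hf; omega
  | succ f ih =>
    intro i hf
    simp only [scanQuoteF]
    by_cases hlt : i < (cs.length : Int)
    · simp only [if_pos hlt]
      split_ifs with h1 h2
      · have := ih (i + 2) (by omega); constructor
        · intro _; by_cases h3 : i + 2 ≤ (cs.length : Int)
          · have := this.1 h3; omega
          · have h4 := pv_scanQF_stab cs q f (((cs.length : Int) - (i + 2)).toNat + 1) (i + 2)
              (by omega) (by omega)
            rw [h4]; simp only [scanQuoteF, if_neg (by omega : ¬ (i + 2) < (cs.length : Int))]
            omega
        · exact this.2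
      · constructor <;> omega
      · have := ih (i + 1) (by omega); constructor
        · intro _; have := this.1 (by omega); omega
        · exact this.2
    · simp only [if_neg hlt]; constructor <;> omega

-- stability + bounds for A's three fueled loops, one strong induction on len - x
lemma pvA_triple (cs : List Char) : ∀ m : Nat, ∀ x : Int, (((cs.length : Int) - x).toNat) ≤ m →
    (∀ f g, pvFS cs x < f → pvFS cs x < g →
      skipAF cs x f = skipAF cs x g ∧ x ≤ skipAF cs x f ∧
        skipAF cs x f ≤ max x (cs.length : Int)) ∧
    (∀ f g, pvFT cs x < f → pvFT cs x < g →
      tmplAF cs x f = tmplAF cs x g ∧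
        (x ≤ (cs.length : Int) → x ≤ tmplAF cs x f ∧ tmplAF cs x f ≤ (cs.length : Int))) ∧
    (∀ d f g, pvFE cs x < f → pvFE cs x < g →
      exprAF cs x d f = exprAF cs x d g ∧ x ≤ exprAF cs x d f ∧
        (x ≤ (cs.length : Int) → exprAF cs x d f ≤ (cs.length : Int))) := by
  intro m
  induction m with
  | zero =>
    intro x hm
    have hxL : (cs.length : Int) ≤ x := by omega
    refine ⟨?_, ?_, ?_⟩
    · intro f g hf hg
      obtain ⟨f', rfl⟩ : ∃ f', f = f' + 1 := ⟨f - 1, by simp [pvFS] at hf; omega⟩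
      obtain ⟨g', rfl⟩ : ∃ g', g = g' + 1 := ⟨g - 1, by simp [pvFS] at hg; omega⟩
      simp only [skipAF, if_pos hxL]
      exact ⟨by trivial, le_refl x, le_max_left _ _⟩
    · intro f g hf hg
      obtain ⟨f', rfl⟩ : ∃ f', f = f' + 1 := ⟨f - 1, by simp [pvFT] at hf; omega⟩
      obtain ⟨g', rfl⟩ : ∃ g', g = g' + 1 := ⟨g - 1, by simp [pvFT] at hg; omega⟩
      simp only [tmplAF, if_pos hxL]
      exact ⟨by trivial, fun h => ⟨h, le_refl _⟩⟩
    · intro d f g hf hg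
      obtain ⟨f', rfl⟩ : ∃ f', f = f' + 1 := ⟨f - 1, by simp [pvFE] at hf; omega⟩
      obtain ⟨g', rfl⟩ : ∃ g', g = g' + 1 := ⟨g - 1, by simp [pvFE] at hg; omega⟩
      have hng : ¬ (x < (cs.length : Int) ∧ 0 < d) := by omega
      simp only [exprAF, if_pos hng]
      exact ⟨by trivial, le_refl x, fun h => h⟩
  | succ m ih =>
    intro x hm
    by_cases hxL : (cs.length : Int) ≤ x
    · refine ⟨?_, ?_, ?_⟩
      · intro f g hf hg
        obtain ⟨f', rfl⟩ : ∃ f', f = f' + 1 := ⟨f - 1, by simp [pvFS] at hf; omega⟩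
        obtain ⟨g', rfl⟩ : ∃ g', g = g' + 1 := ⟨g - 1, by simp [pvFS] at hg; omega⟩
        simp only [skipAF, if_pos hxL]
        exact ⟨by trivial, le_refl x, le_max_left _ _⟩
      · intro f g hf hg
        obtain ⟨f', rfl⟩ : ∃ f', f = f' + 1 := ⟨f - 1, by simp [pvFT] at hf; omega⟩
        obtain ⟨g', rfl⟩ : ∃ g', g = g' + 1 := ⟨g - 1, by simp [pvFT] at hg; omega⟩
        simp only [tmplAF, if_pos hxL]
        exact ⟨by trivial, fun h => ⟨h, le_refl _⟩⟩
      · intro d f g hf hg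
        obtain ⟨f', rfl⟩ : ∃ f', f = f' + 1 := ⟨f - 1, by simp [pvFE] at hf; omega⟩
        obtain ⟨g', rfl⟩ : ∃ g', g = g' + 1 := ⟨g - 1, by simp [pvFE] at hg; omega⟩
        have hng : ¬ (x < (cs.length : Int) ∧ 0 < d) := by omega
        simp only [exprAF, if_pos hng]
        exact ⟨by trivial, le_refl x, fun h => h⟩
    · have hx : x < (cs.length : Int) := by omega
      have hD1 : 1 ≤ ((cs.length : Int) - x).toNat := by omega
      have SK : ∀ f g, pvFS cs x < f → pvFS cs x < g →
          skipAF cs x f = skipAF cs x g ∧ x ≤ skipAF cs x f ∧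
            skipAF cs x f ≤ max x (cs.length : Int) := by
        intro f g hf hg
        obtain ⟨f', rfl⟩ : ∃ f', f = f' + 1 := ⟨f - 1, by simp [pvFS] at hf; omega⟩
        obtain ⟨g', rfl⟩ : ∃ g', g = g' + 1 := ⟨g - 1, by simp [pvFS] at hg; omega⟩
        simp only [skipAF, if_neg hxL]
        by_cases c1 : pvRd cs x = '/' ∧ x + 1 < (cs.length : Int) ∧ pvRd cs (x + 1) = '/'
        · simp only [if_pos c1]
          exact ⟨trivial, by have := pv_nl_adv cs x hx c1.1; constructor <;> omega⟩
        · simp only [if_neg c1]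
          by_cases c2 : pvRd cs x = '/' ∧ x + 1 < (cs.length : Int) ∧ pvRd cs (x + 1) = '*'
          · simp only [if_pos c2]
            exact ⟨trivial, by have := pv_blk_adv cs x hx; constructor <;> omega⟩
          · simp only [if_neg c2]
            by_cases c3 : pvRd cs x = '"' ∨ pvRd cs x = '\''
            · simp only [if_pos c3]
              have := pv_scanQ_bounds cs (pvRd cs x) (x + 1)
              exact ⟨trivial, by have := this.1 (by omega); omega, by have := this.2; omega⟩
            · simp only [if_neg c3]
              by_cases c4 : pvRd cs x = '`'
              · simp only [if_pos c4]
                have hT := (ih (x + 1) (by omega)).2.1 f' g'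
                  (by simp [pvFT, pvFS] at hf ⊢; omega) (by simp [pvFT, pvFS] at hg ⊢; omega)
                refine ⟨hT.1, ?_, ?_⟩
                · have := (hT.2 (by omega)).1; omega
                · have := (hT.2 (by omega)).2; omega
              · simp only [if_neg c4]
                exact ⟨trivial, le_refl x, le_max_left _ _⟩
      have TM : ∀ f g, pvFT cs x < f → pvFT cs x < g →
          tmplAF cs x f = tmplAF cs x g ∧
            (x ≤ (cs.length : Int) → x ≤ tmplAF cs x f ∧ tmplAF cs x f ≤ (cs.length : Int)) := by
        intro f g hf hg
        obtain ⟨f', rfl⟩ : ∃ f', f = f' + 1 := ⟨f - 1, by simp [pvFT] at hf; omega⟩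
        obtain ⟨g', rfl⟩ : ∃ g', g = g' + 1 := ⟨g - 1, by simp [pvFT] at hg; omega⟩
        simp only [tmplAF, if_neg hxL]
        by_cases e1 : pvRd cs x = '\\' ∧ x + 1 < (cs.length : Int)
        · simp only [if_pos e1]
          have hT := (ih (x + 2) (by omega)).2.1 f' g'
            (by simp [pvFT] at hf ⊢; omega) (by simp [pvFT] at hg ⊢; omega)
          refine ⟨hT.1, fun _ => ?_⟩
          have := hT.2 (by omega); constructor <;> omega
        · simp only [if_neg e1]
          by_cases e2 : pvRd cs x = '`'
          · simp only [if_pos e2]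
            exact ⟨trivial, fun _ => by constructor <;> omega⟩
          · simp only [if_neg e2]
            by_cases e3 : pvRd cs x = '$' ∧ x + 1 < (cs.length : Int) ∧ pvRd cs (x + 1) = '{'
            · simp only [if_pos e3]
              have hE := (ih (x + 2) (by omega)).2.2 1 f' g'
                (by simp [pvFE, pvFT] at hf ⊢; omega) (by simp [pvFE, pvFT] at hg ⊢; omega)
              have hr2 : x + 2 ≤ exprAF cs (x + 2) 1 f' := hE.2.1
              have hrL : exprAF cs (x + 2) 1 f' ≤ (cs.length : Int) := hE.2.2 (by omega)
              rw [← hE.1]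
              have hT := (ih (exprAF cs (x + 2) 1 f') (by omega)).2.1 f' g'
                (by simp [pvFT] at hf ⊢; omega) (by simp [pvFT] at hg ⊢; omega)
              refine ⟨hT.1, fun _ => ?_⟩
              have := hT.2 (by omega); constructor <;> omega
            · simp only [if_neg e3]
              have hT := (ih (x + 1) (by omega)).2.1 f' g'
                (by simp [pvFT] at hf ⊢; omega) (by simp [pvFT] at hg ⊢; omega)
              refine ⟨hT.1, fun _ => ?_⟩
              have := hT.2 (by omega); constructor <;> omega
      have EX : ∀ d f g, pvFE cs x < f → pvFE cs x < g →
          exprAF cs x d f = exprAF cs x d g ∧ x ≤ exprAF cs x d f ∧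
            (x ≤ (cs.length : Int) → exprAF cs x d f ≤ (cs.length : Int)) := by
        intro d f g hf hg
        obtain ⟨f', rfl⟩ : ∃ f', f = f' + 1 := ⟨f - 1, by simp [pvFE] at hf; omega⟩
        obtain ⟨g', rfl⟩ : ∃ g', g = g' + 1 := ⟨g - 1, by simp [pvFE] at hg; omega⟩
        by_cases hd : 0 < d
        · have hgd : ¬ ¬ (x < (cs.length : Int) ∧ 0 < d) := by simp; exact ⟨hx, hd⟩
          simp only [exprAF, if_neg hgd]
          have hS := SK f' g' (by simp [pvFS, pvFE] at hf ⊢; omega)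
            (by simp [pvFS, pvFE] at hg ⊢; omega)
          rw [← hS.1]
          have hnjL : skipAF cs x f' ≤ (cs.length : Int) := by
            have := hS.2.2; omega
          by_cases hnj : skipAF cs x f' ≠ x
          · simp only [if_pos hnj]
            have hnj1 : x + 1 ≤ skipAF cs x f' := by have := hS.2.1; omega
            have hE := (ih (skipAF cs x f') (by omega)).2.2 d f' g'
              (by simp [pvFE] at hf ⊢; omega) (by simp [pvFE] at hg ⊢; omega)
            refine ⟨hE.1, by have := hE.2.1; omega, fun _ => hE.2.2 (by omega)⟩
          · simp only [if_neg hnj]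
            have hEx1 : ∀ d', 0 < d' → exprAF cs (x + 1) d' f' = exprAF cs (x + 1) d' g' ∧
                x + 1 ≤ exprAF cs (x + 1) d' f' ∧ exprAF cs (x + 1) d' f' ≤ (cs.length : Int) := by
              intro d' _
              have hE := (ih (x + 1) (by omega)).2.2 d' f' g'
                (by simp [pvFE] at hf ⊢; omega) (by simp [pvFE] at hg ⊢; omega)
              exact ⟨hE.1, hE.2.1, hE.2.2 (by omega)⟩
            by_cases b1 : pvRd cs x = '{'
            · simp only [if_pos b1]
              have := hEx1 (d + 1) (by omega)
              exact ⟨this.1, by omega, fun _ => this.2.2⟩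
            · simp only [if_neg b1]
              by_cases b2 : pvRd cs x = '}'
              · simp only [if_pos b2]
                by_cases hd1 : d = 1
                · simp only [if_pos hd1]
                  exact ⟨trivial, by omega, fun _ => by omega⟩
                · simp only [if_neg hd1]
                  have := hEx1 (d - 1) (by omega)
                  exact ⟨this.1, by omega, fun _ => this.2.2⟩
              · simp only [if_neg b2]
                have := hEx1 d hd
                exact ⟨this.1, by omega, fun _ => this.2.2⟩
        · have hng : ¬ (x < (cs.length : Int) ∧ 0 < d) := by omega
          simp only [exprAF, if_pos hng]
          exact ⟨by trivial, le_refl x, fun h => h⟩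
      exact ⟨SK, TM, EX⟩

lemma pv_runBF_stab (cs : List Char) : ∀ m : Nat, ∀ i : Int, ∀ st : List Int, ∀ f g : Nat,
    (((cs.length : Int) - i).toNat) ≤ m → -(cs.length : Int) < i →
    (((cs.length : Int) - i).toNat) < f → (((cs.length : Int) - i).toNat) < g →
    runBF cs st i f = runBF cs st i g := by
  intro m
  induction m with
  | zero =>
    intro i st f g hm h0 hf hg
    obtain ⟨f', rfl⟩ : ∃ f', f = f' + 1 := ⟨f - 1, by omega⟩
    obtain ⟨g', rfl⟩ : ∃ g', g = g' + 1 := ⟨g - 1, by omega⟩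
    cases st with
    | nil => simp only [runBF]
    | cons t rest => simp only [runBF, if_pos (show (cs.length : Int) ≤ i by omega)]
  | succ m ih =>
    intro i st f g hm h0 hf hg
    obtain ⟨f', rfl⟩ : ∃ f', f = f' + 1 := ⟨f - 1, by omega⟩
    obtain ⟨g', rfl⟩ : ∃ g', g = g' + 1 := ⟨g - 1, by omega⟩
    cases st with
    | nil => simp only [runBF]
    | cons t rest =>
      by_cases hxL : (cs.length : Int) ≤ i
      · simp only [runBF, if_pos hxL]
      · have hx : i < (cs.length : Int) := by omega
        simp only [runBF, if_neg hxL]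
        by_cases ht : t = -1
        · simp only [if_pos ht]
          by_cases e1 : pvRd cs i = '\\' ∧ i + 1 < (cs.length : Int)
          · simp only [if_pos e1]
            exact ih (i + 2) _ f' g' (by omega) (by omega) (by omega) (by omega)
          · simp only [if_neg e1]
            by_cases e2 : pvRd cs i = '`'
            · simp only [if_pos e2]
              exact ih (i + 1) _ f' g' (by omega) (by omega) (by omega) (by omega)
            · simp only [if_neg e2]
              by_cases e3 : pvRd cs i = '$' ∧ i + 1 < (cs.length : Int) ∧ pvRd cs (i + 1) = '{'
              · simp only [if_pos e3]
                exact ih (i + 2) _ f' g' (by omega) (by omega) (by omega) (by omega)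
              · simp only [if_neg e3]
                exact ih (i + 1) _ f' g' (by omega) (by omega) (by omega) (by omega)
        · simp only [if_neg ht]
          by_cases c1 : pvRd cs i = '/' ∧ i + 1 < (cs.length : Int) ∧ pvRd cs (i + 1) = '/'
          · simp only [if_pos c1]
            have hadv := pv_nl_adv cs i hx c1.1
            exact ih _ _ f' g' (by omega) (by omega) (by omega) (by omega)
          · simp only [if_neg c1]
            by_cases c2 : pvRd cs i = '/' ∧ i + 1 < (cs.length : Int) ∧ pvRd cs (i + 1) = '*'
            · simp only [if_pos c2]
              have hadv := pv_blk_adv cs i hx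
              exact ih _ _ f' g' (by omega) (by omega) (by omega) (by omega)
            · simp only [if_neg c2]
              by_cases c3 : pvRd cs i = '"' ∨ pvRd cs i = '\''
              · simp only [if_pos c3]
                have hadv := pv_scanQ_bounds cs (pvRd cs i) (i + 1)
                have hadv1 := hadv.1 (by omega)
                exact ih _ _ f' g' (by omega) (by omega) (by omega) (by omega)
              · simp only [if_neg c3]
                by_cases c4 : pvRd cs i = '`'
                · simp only [if_pos c4]
                  exact ih (i + 1) _ f' g' (by omega) (by omega) (by omega) (by omega)
                · simp only [if_neg c4]
                  by_cases c5 : pvRd cs i = '{'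
                  · simp only [if_pos c5]
                    exact ih (i + 1) _ f' g' (by omega) (by omega) (by omega) (by omega)
                  · simp only [if_neg c5]
                    by_cases c6 : pvRd cs i = '}'
                    · simp only [if_pos c6]
                      by_cases ht1 : t - 1 = 0
                      · simp only [if_pos ht1]
                        exact ih (i + 1) _ f' g' (by omega) (by omega) (by omega) (by omega)
                      · simp only [if_neg ht1]
                        exact ih (i + 1) _ f' g' (by omega) (by omega) (by omega) (by omega)
                    · simp only [if_neg c6]
                      exact ih (i + 1) _ f' g' (by omega) (by omega) (by omega) (by omega)

-- canonical-form facts derived from pvA_triple / pv_runBF_stab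
lemma pvSkipA_bounds (cs : List Char) (x : Int) :
    x ≤ pvSkipA cs x ∧ pvSkipA cs x ≤ max x (cs.length : Int) := by
  have h := ((pvA_triple cs (((cs.length : Int) - x).toNat) x (le_refl _)).1
    (pvFS cs x + 1) (pvFS cs x + 1) (by omega) (by omega))
  exact ⟨h.2.1, h.2.2⟩

lemma pvTmplA_bounds (cs : List Char) (x : Int) (h : x ≤ (cs.length : Int)) :
    x ≤ pvTmplA cs x ∧ pvTmplA cs x ≤ (cs.length : Int) := by
  have h2 := ((pvA_triple cs (((cs.length : Int) - x).toNat) x (le_refl _)).2.1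
    (pvFT cs x + 1) (pvFT cs x + 1) (by omega) (by omega))
  exact h2.2 h

lemma pvExprA_bounds (cs : List Char) (x d : Int) :
    x ≤ pvExprA cs x d ∧ (x ≤ (cs.length : Int) → pvExprA cs x d ≤ (cs.length : Int)) := by
  have h2 := ((pvA_triple cs (((cs.length : Int) - x).toNat) x (le_refl _)).2.2
    d (pvFE cs x + 1) (pvFE cs x + 1) (by omega) (by omega))
  exact ⟨h2.2.1, h2.2.2⟩

lemma pv_skipAF_canon (cs : List Char) (x : Int) (f : Nat) (hf : pvFS cs x < f) :
    skipAF cs x f = pvSkipA cs x :=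
  ((pvA_triple cs (((cs.length : Int) - x).toNat) x (le_refl _)).1 f (pvFS cs x + 1)
    hf (by omega)).1

lemma pv_tmplAF_canon (cs : List Char) (x : Int) (f : Nat) (hf : pvFT cs x < f) :
    tmplAF cs x f = pvTmplA cs x :=
  ((pvA_triple cs (((cs.length : Int) - x).toNat) x (le_refl _)).2.1 f (pvFT cs x + 1)
    hf (by omega)).1

lemma pv_exprAF_canon (cs : List Char) (x d : Int) (f : Nat) (hf : pvFE cs x < f) :
    exprAF cs x d f = pvExprA cs x d :=
  ((pvA_triple cs (((cs.length : Int) - x).toNat) x (le_refl _)).2.2 d f (pvFE cs x + 1)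
    hf (by omega)).1

lemma pv_runBF_canon (cs : List Char) (st : List Int) (i : Int) (f : Nat)
    (h0 : -(cs.length : Int) < i) (hf : (((cs.length : Int) - i).toNat) < f) :
    runBF cs st i f = pvRunB cs st i :=
  pv_runBF_stab cs (((cs.length : Int) - i).toNat) i st f ((((cs.length : Int) - i).toNat) + 1)
    (le_refl _) h0 hf (by omega)

lemma pvRunB_nil (cs : List Char) (i : Int) : pvRunB cs [] i = i := by
  simp only [pvRunB, runBF]

lemma pvRunB_ge (cs : List Char) (t : Int) (st : List Int) (i : Int)
    (h : (cs.length : Int) ≤ i) : pvRunB cs (t :: st) i = (cs.length : Int) := by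
  simp only [pvRunB, runBF, if_pos h]

lemma pvTmplA_ge (cs : List Char) (x : Int) (h : (cs.length : Int) ≤ x) :
    pvTmplA cs x = (cs.length : Int) := by
  simp only [pvTmplA, tmplAF, if_pos h]

lemma pvExprA_stop (cs : List Char) (x d : Int) (h : ¬ (x < (cs.length : Int) ∧ 0 < d)) :
    pvExprA cs x d = x := by
  simp only [pvExprA, exprAF, if_pos h]

lemma pvSkipA_step (cs : List Char) (x : Int) (hx : x < (cs.length : Int)) :
    pvSkipA cs x =
      (if pvRd cs x = '/' ∧ x + 1 < (cs.length : Int) ∧ pvRd cs (x + 1) = '/' then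
        (if PySem.Chars.findFrom cs ['\n'] x = -1 then (cs.length : Int)
         else PySem.Chars.findFrom cs ['\n'] x)
      else if pvRd cs x = '/' ∧ x + 1 < (cs.length : Int) ∧ pvRd cs (x + 1) = '*' then
        (if PySem.Chars.findFrom cs ['*', '/'] (x + 2) = -1 then (cs.length : Int)
         else PySem.Chars.findFrom cs ['*', '/'] (x + 2) + 2)
      else if pvRd cs x = '"' ∨ pvRd cs x = '\'' then scanQuote cs (x + 1) (pvRd cs x)
      else if pvRd cs x = '`' then pvTmplA cs (x + 1)
      else x) := by
  have h1 : pvSkipA cs x = skipAF cs x (pvFS cs x + 1) := rfl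
  rw [h1]
  simp only [skipAF, if_neg (show ¬ (cs.length : Int) ≤ x by omega)]
  rw [pv_tmplAF_canon cs (x + 1) (pvFS cs x) (by simp [pvFS, pvFT]; omega)]

lemma pvTmplA_step (cs : List Char) (x : Int) (hx : x < (cs.length : Int)) :
    pvTmplA cs x =
      (if pvRd cs x = '\\' ∧ x + 1 < (cs.length : Int) then pvTmplA cs (x + 2)
      else if pvRd cs x = '`' then x + 1
      else if pvRd cs x = '$' ∧ x + 1 < (cs.length : Int) ∧ pvRd cs (x + 1) = '{' then
        pvTmplA cs (pvExprA cs (x + 2) 1)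
      else pvTmplA cs (x + 1)) := by
  have h1 : pvTmplA cs x = tmplAF cs x (pvFT cs x + 1) := rfl
  rw [h1]
  simp only [tmplAF, if_neg (show ¬ (cs.length : Int) ≤ x by omega)]
  by_cases e1 : pvRd cs x = '\\' ∧ x + 1 < (cs.length : Int)
  · simp only [if_pos e1]
    exact pv_tmplAF_canon cs (x + 2) (pvFT cs x) (by simp [pvFT]; omega)
  · simp only [if_neg e1]
    by_cases e2 : pvRd cs x = '`'
    · simp only [if_pos e2]
    · simp only [if_neg e2]
      by_cases e3 : pvRd cs x = '$' ∧ x + 1 < (cs.length : Int) ∧ pvRd cs (x + 1) = '{'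
      · simp only [if_pos e3]
        rw [pv_exprAF_canon cs (x + 2) 1 (pvFT cs x) (by simp [pvFT, pvFE]; omega)]
        have hr2 : x + 2 ≤ pvExprA cs (x + 2) 1 := (pvExprA_bounds cs (x + 2) 1).1
        exact pv_tmplAF_canon cs (pvExprA cs (x + 2) 1) (pvFT cs x) (by simp [pvFT]; omega)
      · simp only [if_neg e3]
        exact pv_tmplAF_canon cs (x + 1) (pvFT cs x) (by simp [pvFT]; omega)

lemma pvExprA_step (cs : List Char) (x d : Int) (hx : x < (cs.length : Int)) (hd : 0 < d) :
    pvExprA cs x d =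
      (if pvSkipA cs x ≠ x then pvExprA cs (pvSkipA cs x) d
      else if pvRd cs x = '{' then pvExprA cs (x + 1) (d + 1)
      else if pvRd cs x = '}' then (if d = 1 then x + 1 else pvExprA cs (x + 1) (d - 1))
      else pvExprA cs (x + 1) d) := by
  have h1 : pvExprA cs x d = exprAF cs x d (pvFE cs x + 1) := rfl
  rw [h1]
  simp only [exprAF, if_neg (show ¬ ¬ (x < (cs.length : Int) ∧ 0 < d) from not_not_intro ⟨hx, hd⟩)]
  rw [pv_skipAF_canon cs x (pvFE cs x) (by simp only [pvFS, pvFE]; omega)]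
  by_cases hnj : pvSkipA cs x ≠ x
  · simp only [if_pos hnj]
    have hlb : x ≤ pvSkipA cs x := (pvSkipA_bounds cs x).1
    exact pv_exprAF_canon cs (pvSkipA cs x) d (pvFE cs x) (by simp [pvFE]; omega)
  · simp only [if_neg hnj]
    by_cases b1 : pvRd cs x = '{'
    · simp only [if_pos b1]
      exact pv_exprAF_canon cs (x + 1) (d + 1) (pvFE cs x) (by simp [pvFE]; omega)
    · simp only [if_neg b1]
      by_cases b2 : pvRd cs x = '}'
      · simp only [if_pos b2]
        by_cases hd1 : d = 1
        · simp only [if_pos hd1]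
        · simp only [if_neg hd1]
          exact pv_exprAF_canon cs (x + 1) (d - 1) (pvFE cs x) (by simp [pvFE]; omega)
      · simp only [if_neg b2]
        exact pv_exprAF_canon cs (x + 1) d (pvFE cs x) (by simp [pvFE]; omega)

-- the simulation: one template frame runs A's backtick loop, one ${} frame runs A's expr loop
lemma pvTE (cs : List Char) : ∀ m : Nat, ∀ x : Int, (((cs.length : Int) - x).toNat) ≤ m →
    -(cs.length : Int) < x →
    (∀ st, pvRunB cs (-1 :: st) x = pvRunB cs st (pvTmplA cs x)) ∧
    (∀ d st, 1 ≤ d → st ≠ [] → pvRunB cs (d :: st) x = pvRunB cs st (pvExprA cs x d)) := by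
  intro m
  induction m with
  | zero =>
    intro x hm h0
    have hxL : (cs.length : Int) ≤ x := by omega
    constructor
    · intro st
      rw [pvRunB_ge cs (-1) st x hxL, pvTmplA_ge cs x hxL]
      cases st with
      | nil => rw [pvRunB_nil]
      | cons t rest => rw [pvRunB_ge cs t rest _ (le_refl _)]
    · intro d st hd hst
      rw [pvRunB_ge cs d st x hxL, pvExprA_stop cs x d (by omega)]
      cases st with
      | nil => exact absurd rfl hst
      | cons t rest => rw [pvRunB_ge cs t rest x hxL]
  | succ m ih =>
    intro x hm h0
    by_cases hxL : (cs.length : Int) ≤ x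
    · constructor
      · intro st
        rw [pvRunB_ge cs (-1) st x hxL, pvTmplA_ge cs x hxL]
        cases st with
        | nil => rw [pvRunB_nil]
        | cons t rest => rw [pvRunB_ge cs t rest _ (le_refl _)]
      · intro d st hd hst
        rw [pvRunB_ge cs d st x hxL, pvExprA_stop cs x d (by omega)]
        cases st with
        | nil => exact absurd rfl hst
        | cons t rest => rw [pvRunB_ge cs t rest x hxL]
    · have hx : x < (cs.length : Int) := by omega
      constructor
      · -- template frame
        intro st
        have hun : pvRunB cs (-1 :: st) x =
            runBF cs (-1 :: st) x ((((cs.length : Int) - x).toNat) + 1) := rfl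
        rw [hun]
        simp only [runBF]
        rw [if_neg hxL]
        simp only [if_true]
        rw [pvTmplA_step cs x hx]
        by_cases e1 : pvRd cs x = '\\' ∧ x + 1 < (cs.length : Int)
        · rw [if_pos e1, if_pos e1]
          rw [pv_runBF_canon cs _ (x + 2) _ (by omega) (by omega)]
          exact (ih (x + 2) (by omega) (by omega)).1 st
        · rw [if_neg e1, if_neg e1]
          by_cases e2 : pvRd cs x = '`'
          · rw [if_pos e2, if_pos e2]
            rw [pv_runBF_canon cs _ (x + 1) _ (by omega) (by omega)]
          · rw [if_neg e2, if_neg e2]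
            by_cases e3 : pvRd cs x = '$' ∧ x + 1 < (cs.length : Int) ∧ pvRd cs (x + 1) = '{'
            · rw [if_pos e3, if_pos e3]
              rw [pv_runBF_canon cs _ (x + 2) _ (by omega) (by omega)]
              have hE := (ih (x + 2) (by omega) (by omega)).2 1 (-1 :: st) (le_refl 1)
                (by simp)
              rw [hE]
              have hr2 : x + 2 ≤ pvExprA cs (x + 2) 1 := (pvExprA_bounds cs (x + 2) 1).1
              exact (ih (pvExprA cs (x + 2) 1) (by omega) (by omega)).1 st
            · rw [if_neg e3, if_neg e3]
              rw [pv_runBF_canon cs _ (x + 1) _ (by omega) (by omega)]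
              exact (ih (x + 1) (by omega) (by omega)).1 st
      · -- ${...} frame at depth d
        intro d st hd hst
        have hd0 : 0 < d := by omega
        have hun : pvRunB cs (d :: st) x =
            runBF cs (d :: st) x ((((cs.length : Int) - x).toNat) + 1) := rfl
        rw [hun]
        simp only [runBF]
        rw [if_neg hxL, if_neg (show ¬ (d : Int) = -1 by omega)]
        rw [pvExprA_step cs x d hx hd0]
        by_cases c1 : pvRd cs x = '/' ∧ x + 1 < (cs.length : Int) ∧ pvRd cs (x + 1) = '/'
        · rw [if_pos c1]
          have hsk : pvSkipA cs x =
              (if PySem.Chars.findFrom cs ['\n'] x = -1 then (cs.length : Int)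
               else PySem.Chars.findFrom cs ['\n'] x) := by
            rw [pvSkipA_step cs x hx]; rw [if_pos c1]
          have hadv := pv_nl_adv cs x hx c1.1
          rw [hsk, if_pos (show _ ≠ x by omega)]
          rw [pv_runBF_canon cs _ _ _ (by omega) (by omega)]
          exact (ih _ (by omega) (by omega)).2 d st hd hst
        · rw [if_neg c1]
          by_cases c2 : pvRd cs x = '/' ∧ x + 1 < (cs.length : Int) ∧ pvRd cs (x + 1) = '*'
          · rw [if_pos c2]
            have hsk : pvSkipA cs x =
                (if PySem.Chars.findFrom cs ['*', '/'] (x + 2) = -1 then (cs.length : Int)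
                 else PySem.Chars.findFrom cs ['*', '/'] (x + 2) + 2) := by
              rw [pvSkipA_step cs x hx]; rw [if_neg c1, if_pos c2]
            have hadv := pv_blk_adv cs x hx
            rw [hsk, if_pos (show _ ≠ x by omega)]
            rw [pv_runBF_canon cs _ _ _ (by omega) (by omega)]
            exact (ih _ (by omega) (by omega)).2 d st hd hst
          · rw [if_neg c2]
            by_cases c3 : pvRd cs x = '"' ∨ pvRd cs x = '\''
            · rw [if_pos c3]
              have hsk : pvSkipA cs x = scanQuote cs (x + 1) (pvRd cs x) := by
                rw [pvSkipA_step cs x hx]; rw [if_neg c1, if_neg c2, if_pos c3]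
              have hadv := (pv_scanQ_bounds cs (pvRd cs x) (x + 1)).1 (by omega)
              rw [hsk, if_pos (show _ ≠ x by omega)]
              rw [pv_runBF_canon cs _ _ _ (by omega) (by omega)]
              exact (ih _ (by omega) (by omega)).2 d st hd hst
            · rw [if_neg c3]
              by_cases c4 : pvRd cs x = '`'
              · rw [if_pos c4]
                have hsk : pvSkipA cs x = pvTmplA cs (x + 1) := by
                  rw [pvSkipA_step cs x hx]
                  rw [if_neg c1, if_neg c2, if_neg c3, if_pos c4]
                have hadv := pvTmplA_bounds cs (x + 1) (by omega)
                rw [hsk, if_pos (show pvTmplA cs (x + 1) ≠ x by omega)]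
                rw [pv_runBF_canon cs _ (x + 1) _ (by omega) (by omega)]
                have hT := (ih (x + 1) (by omega) (by omega)).1 (d :: st)
                rw [hT]
                exact (ih (pvTmplA cs (x + 1)) (by omega) (by omega)).2 d st hd hst
              · rw [if_neg c4]
                have hsk : pvSkipA cs x = x := by
                  rw [pvSkipA_step cs x hx]
                  rw [if_neg c1, if_neg c2, if_neg c3, if_neg c4]
                rw [hsk, if_neg (show ¬ (x ≠ x) from not_not_intro rfl)]
                by_cases c5 : pvRd cs x = '{'
                · rw [if_pos c5, if_pos c5]
                  rw [pv_runBF_canon cs _ (x + 1) _ (by omega) (by omega)]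
                  exact (ih (x + 1) (by omega) (by omega)).2 (d + 1) st (by omega) hst
                · rw [if_neg c5, if_neg c5]
                  by_cases c6 : pvRd cs x = '}'
                  · rw [if_pos c6, if_pos c6]
                    by_cases hd1 : d = 1
                    · rw [if_pos (show d - 1 = 0 by omega), if_pos hd1]
                      rw [pv_runBF_canon cs _ (x + 1) _ (by omega) (by omega)]
                    · rw [if_neg (show ¬ d - 1 = 0 by omega), if_neg hd1]
                      rw [pv_runBF_canon cs _ (x + 1) _ (by omega) (by omega)]
                      exact (ih (x + 1) (by omega) (by omega)).2 (d - 1) st (by omega) hst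
                  · rw [if_neg c6, if_neg c6]
                    rw [pv_runBF_canon cs _ (x + 1) _ (by omega) (by omega)]
                    exact (ih (x + 1) (by omega) (by omega)).2 d st hd hst

-- ===== VERDICT (by name: the statement is the Claim_ definition above) =====
theorem skip_string_or_comment_py_spec : Claim_equal_skip_string_or_comment_py := by
  intro s pos _hdom hpre
  show skip_string_or_comment_py s pos = skip_string_or_comment_py_alt s pos
  have hpre' : -(s.toList.length : Int) ≤ pos := hpre
  simp only [skip_string_or_comment_py, skip_string_or_comment_py_alt]
  by_cases hge : (s.toList.length : Int) ≤ pos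
  · rw [show 2 * (((s.toList.length : Int) - pos).toNat) + 8 =
      (2 * (((s.toList.length : Int) - pos).toNat) + 7) + 1 from rfl]
    simp only [skipAF, if_pos hge]
  · have hx : pos < (s.toList.length : Int) := by omega
    have hA : skipAF s.toList pos (2 * (((s.toList.length : Int) - pos).toNat) + 8) =
        pvSkipA s.toList pos :=
      pv_skipAF_canon s.toList pos _ (by simp only [pvFS]; omega)
    rw [hA, pvSkipA_step s.toList pos hx, if_neg hge]
    by_cases c1 : pvRd s.toList pos = '/' ∧ pos + 1 < (s.toList.length : Int) ∧
        pvRd s.toList (pos + 1) = '/'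
    · rw [if_pos c1, if_pos c1]
    · rw [if_neg c1, if_neg c1]
      by_cases c2 : pvRd s.toList pos = '/' ∧ pos + 1 < (s.toList.length : Int) ∧
          pvRd s.toList (pos + 1) = '*'
      · rw [if_pos c2, if_pos c2]
      · rw [if_neg c2, if_neg c2]
        by_cases c3 : pvRd s.toList pos = '"' ∨ pvRd s.toList pos = '\''
        · rw [if_pos c3, if_pos c3]
        · rw [if_neg c3, if_neg c3]
          by_cases c4 : pvRd s.toList pos = '`'
          · rw [if_pos c4, if_pos c4]
            rw [pv_runBF_canon s.toList [-1] (pos + 1) _ (by omega) (by omega)]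
            rw [(pvTE s.toList (((s.toList.length : Int) - (pos + 1)).toNat) (pos + 1)
              (le_refl _) (by omega)).1 []]
            rw [pvRunB_nil]
          · rw [if_neg c4, if_neg c4]
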